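-- pv_equiv track=rewrite | github.com/ReshetnikovPavel/hw_ml4se | hw1/fmtpython.py | _delete_meaningless_spaces_one_line
-- ===== SOURCE A (Python) =====
-- def _delete_meaningless_spaces_one_line(line: str) -> str:
--     res = []
--     words = [word for word in line.split() if word]
--     for i in range(len(words)):
--         res.append(words[i])
--         if (
--             i + 1 < len(words)
--             and (words[i][-1].isalnum() or words[i][-1] == "_")
--             and (words[i + 1][0].isalnum() or words[i + 1][0] == "_")
--         ):
--             res.append(" ")
--     return "".join(res)
-- ===== SOURCE B (Python) =====
-- def _delete_meaningless_spaces_one_line(line: str) -> str: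
--     out = []
--     prev = None   # last emitted (non-space) character
--     gap = False   # saw whitespace since the last emitted character
--     for ch in line:
--         if ch.isspace():
--             gap = prev is not None
--         else:
--             if gap:
--                 if (prev.isalnum() or prev == "_") and (ch.isalnum() or ch == "_"):
--                     out.append(" ")
--                 gap = False
--             out.append(ch)
--             prev = ch
--     return "".join(out)
-- ===== Notes on version B (the rewrite author's own statement) =====
-- stated objective: alternative
-- what changed: Replaces split()-into-a-word-list plus an indexed loop over word pairs with a single character-by-character scan that keeps only the last emitted character and a whitespace-gap flag, never materializing the word list.
import Mathlib
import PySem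

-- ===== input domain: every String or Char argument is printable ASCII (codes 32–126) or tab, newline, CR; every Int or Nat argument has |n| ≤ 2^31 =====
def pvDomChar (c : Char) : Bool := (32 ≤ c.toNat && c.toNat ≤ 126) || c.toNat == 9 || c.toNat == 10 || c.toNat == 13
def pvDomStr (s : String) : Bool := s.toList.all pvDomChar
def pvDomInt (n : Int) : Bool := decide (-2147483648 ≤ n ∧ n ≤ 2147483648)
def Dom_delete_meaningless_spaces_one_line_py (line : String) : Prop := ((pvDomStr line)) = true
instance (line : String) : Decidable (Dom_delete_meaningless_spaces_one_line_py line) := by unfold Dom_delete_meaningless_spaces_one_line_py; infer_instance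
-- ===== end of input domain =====

-- B replaces A's split()-into-a-word-list plus indexed loop over word pairs with a single
-- character-by-character scan keeping only the last emitted character and a gap flag
-- (objective: alternative, same O(n) cost).

-- ===== PORT A =====
-- words[i][-1].isalnum() or words[i][-1] == "_"
def pvCondLast (w : String) : Bool :=
  match PySem.Str.pyGet? w (-1) with
  | some c => PySem.Chars.isalnum c || c == '_'
  | none => false

-- words[i+1][0].isalnum() or words[i+1][0] == "_"
def pvCondHead (w : String) : Bool :=
  match PySem.Str.pyGet? w 0 with
  | some c => PySem.Chars.isalnum c || c == '_'
  | none => false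

-- one iteration of A's `for i in range(len(words))` loop body
def pvBodyA (words : List String) (res : List String) (i : Int) : List String :=
  let res := res ++ [PySem.List.pyGetD words i ""]
  if decide (i + 1 < (words.length : Int)) && pvCondLast (PySem.List.pyGetD words i "")
      && pvCondHead (PySem.List.pyGetD words (i + 1) "") then
    res ++ [" "]
  else res

def delete_meaningless_spaces_one_line_py (line : String) : String :=
  let words := (PySem.Str.split₀ line).filter (fun w => !(w == ""))
  let res := (PySem.List.pyRange 0 (words.length : Int) 1).foldl (pvBodyA words) []
  PySem.Str.join "" res

-- ===== PORT B =====
def pvOkC (c : Char) : Bool := PySem.Chars.isalnum c || c == '_'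

-- one step of B's character scan; state = (out, prev, gap)
def pvStepB (st : List Char × Option Char × Bool) (ch : Char) : List Char × Option Char × Bool :=
  let (out, prev, gap) := st
  if PySem.Chars.isspace ch then
    (out, prev, prev.isSome)
  else
    let out :=
      if gap then
        match prev with
        | some p => if pvOkC p && pvOkC ch then out ++ [' '] else out
        | none => out
      else out
    (out ++ [ch], some ch, false)

def delete_meaningless_spaces_one_line_py_alt (line : String) : String :=
  String.ofList (line.toList.foldl pvStepB ([], none, false)).1

-- ===== PRECONDITION & SPEC =====
def Spec_delete_meaningless_spaces_one_line_py (line : String) (out : String) : Prop := out = delete_meaningless_spaces_one_line_py_alt line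
instance (line : String) (out : String) : Decidable (Spec_delete_meaningless_spaces_one_line_py line out) := by unfold Spec_delete_meaningless_spaces_one_line_py; infer_instance

-- ===== CLAIM (what is proved, stated in full; the proofs are below) =====
def Claim_equal_delete_meaningless_spaces_one_line_py : Prop := ∀ (line : String), Dom_delete_meaningless_spaces_one_line_py line → Spec_delete_meaningless_spaces_one_line_py line (delete_meaningless_spaces_one_line_py line)

-- ===== LEMMAS AND PROOFS =====

-- canonical glued form: words joined with a space exactly between an
-- alnum/underscore word end and an alnum/underscore word start
def pvGlueFrom (p : Char) : List (List Char) → List Char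
  | [] => []
  | w :: rest =>
      (if pvOkC p && pvOkC (w.headD ' ') then [' '] else []) ++ w ++ pvGlueFrom (w.getLastD ' ') rest

def pvGlue : List (List Char) → List Char
  | [] => []
  | w :: rest => w ++ pvGlueFrom (w.getLastD ' ') rest

-- the same glued form at the word level (mirrors A's res list)
def pvGlueS : List String → List String
  | [] => []
  | w :: rest =>
      [w] ++ (match rest with
              | [] => []
              | w' :: _ => if pvCondLast w && pvCondHead w' then [" "] else []) ++ pvGlueS rest

theorem pv_go_acc (cs : List Char) : ∀ (cur : List Char) (acc : List (List Char)),
    PySem.Chars.split₀.go cs cur acc = acc.reverse ++ PySem.Chars.split₀.go cs cur [] := by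
  induction cs with
  | nil =>
    intro cur acc
    by_cases h : cur.isEmpty <;> simp [PySem.Chars.split₀.go, h]
  | cons c cs ih =>
    intro cur acc
    by_cases hs : PySem.Chars.isspace c
    · by_cases hc : cur.isEmpty
      · simp only [PySem.Chars.split₀.go, hs, hc, if_true]
        exact ih [] acc
      · simp only [PySem.Chars.split₀.go, hs, hc, if_true]
        rw [ih [] (cur.reverse :: acc), ih [] [cur.reverse]]
        simp
    · simp only [PySem.Chars.split₀.go, hs]
      exact ih (c :: cur) acc

theorem pv_go_cons (cs : List Char) : ∀ (x : Char) (l : List Char),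
    ∃ t ws, PySem.Chars.split₀.go cs (x :: l) [] = ((x :: l).reverse ++ t) :: ws := by
  induction cs with
  | nil =>
    intro x l
    exact ⟨[], [], by simp [PySem.Chars.split₀.go]⟩
  | cons c cs ih =>
    intro x l
    by_cases hs : PySem.Chars.isspace c
    · refine ⟨[], PySem.Chars.split₀.go cs [] [], ?_⟩
      have h1 : PySem.Chars.split₀.go (c :: cs) (x :: l) [] =
          PySem.Chars.split₀.go cs [] [(x :: l).reverse] := by
        simp [PySem.Chars.split₀.go, hs]
      rw [h1, pv_go_acc cs [] [(x :: l).reverse]]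
      simp
    · obtain ⟨t, ws, h⟩ := ih c (x :: l)
      refine ⟨[c] ++ t, ws, ?_⟩
      simp only [PySem.Chars.split₀.go, hs]
      rw [h]
      simp

theorem pv_go_ne (cs : List Char) : ∀ (cur : List Char) (acc : List (List Char)),
    (∀ w ∈ acc, w ≠ []) → ∀ w ∈ PySem.Chars.split₀.go cs cur acc, w ≠ [] := by
  induction cs with
  | nil =>
    intro cur acc hacc w hw
    by_cases h : cur.isEmpty <;> simp only [PySem.Chars.split₀.go, h, if_true] at hw
    · exact hacc w (List.mem_reverse.mp hw)
    · rcases List.mem_cons.mp (List.mem_reverse.mp hw) with h1 | h1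
      · subst h1
        have hcur : cur ≠ [] := by simpa [List.isEmpty_iff] using h
        simpa using hcur
      · exact hacc w h1
  | cons c cs ih =>
    intro cur acc hacc w hw
    by_cases hs : PySem.Chars.isspace c
    · by_cases hc : cur.isEmpty
      · simp only [PySem.Chars.split₀.go, hs, hc, if_true] at hw
        exact ih [] acc hacc w hw
      · simp only [PySem.Chars.split₀.go, hs, hc, if_true] at hw
        refine ih [] (cur.reverse :: acc) ?_ w hw
        intro v hv
        rcases List.mem_cons.mp hv with h1 | h1
        · subst h1
          have hcur : cur ≠ [] := by simpa [List.isEmpty_iff] using hc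
          simpa using hcur
        · exact hacc v h1
    · simp only [PySem.Chars.split₀.go, hs] at hw
      exact ih (c :: cur) acc hacc w hw

theorem pv_glue_cons (cs : List Char) : ∀ (x : Char) (l : List Char),
    pvGlue (PySem.Chars.split₀.go cs (x :: l) []) =
      l.reverse ++ pvGlue (PySem.Chars.split₀.go cs [x] []) := by
  induction cs with
  | nil =>
    intro x l
    simp [PySem.Chars.split₀.go, pvGlue, pvGlueFrom]
  | cons c cs ih =>
    intro x l
    by_cases hs : PySem.Chars.isspace c
    · have h1 : PySem.Chars.split₀.go (c :: cs) (x :: l) [] =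
          (l.reverse ++ [x]) :: PySem.Chars.split₀.go cs [] [] := by
        simp only [PySem.Chars.split₀.go, hs, if_true, List.isEmpty_cons]
        rw [if_neg (by simp), pv_go_acc cs [] [(x :: l).reverse]]
        simp
      have h2 : PySem.Chars.split₀.go (c :: cs) [x] [] =
          [x] :: PySem.Chars.split₀.go cs [] [] := by
        simp only [PySem.Chars.split₀.go, hs, if_true, List.isEmpty_cons]
        rw [if_neg (by simp), pv_go_acc cs [] [[x].reverse]]
        simp
      rw [h1, h2]
      simp [pvGlue]
    · have h1 : PySem.Chars.split₀.go (c :: cs) (x :: l) [] =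
          PySem.Chars.split₀.go cs (c :: x :: l) [] := by
        simp [PySem.Chars.split₀.go, hs]
      have h2 : PySem.Chars.split₀.go (c :: cs) [x] [] =
          PySem.Chars.split₀.go cs (c :: [x]) [] := by
        simp [PySem.Chars.split₀.go, hs]
      rw [h1, h2, ih c (x :: l), ih c [x]]
      simp

theorem pv_scan (cs : List Char) :
    (∀ (out : List Char) (p : Char),
        (cs.foldl pvStepB (out ++ [p], some p, false)).1 =
          out ++ pvGlue (PySem.Chars.split₀.go cs [p] [])) ∧
    (∀ (out : List Char) (p : Char),
        (cs.foldl pvStepB (out, some p, true)).1 =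
          out ++ pvGlueFrom p (PySem.Chars.split₀.go cs [] [])) ∧
    (∀ (out : List Char),
        (cs.foldl pvStepB (out, none, false)).1 =
          out ++ pvGlue (PySem.Chars.split₀.go cs [] [])) := by
  induction cs with
  | nil =>
    refine ⟨fun out p => ?_, fun out p => ?_, fun out => ?_⟩
    · simp [PySem.Chars.split₀.go, pvGlue, pvGlueFrom]
    · simp [PySem.Chars.split₀.go, pvGlueFrom]
    · simp [PySem.Chars.split₀.go, pvGlue]
  | cons c cs ih =>
    obtain ⟨ih1, ih2, ih3⟩ := ih
    by_cases hs : PySem.Chars.isspace c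
    · refine ⟨fun out p => ?_, fun out p => ?_, fun out => ?_⟩
      · -- mid-word, hit a space
        have hgo : PySem.Chars.split₀.go (c :: cs) [p] [] =
            [p] :: PySem.Chars.split₀.go cs [] [] := by
          simp only [PySem.Chars.split₀.go, hs, if_true, List.isEmpty_cons]
          rw [if_neg (by simp), pv_go_acc cs [] [[p].reverse]]
          simp
        simp only [List.foldl_cons, pvStepB, hs, if_true, Option.isSome_some]
        rw [ih2 (out ++ [p]) p, hgo]
        simp [pvGlue]
      · -- in a gap, another space
        simp only [List.foldl_cons, pvStepB, hs, if_true, Option.isSome_some]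
        have hgo : PySem.Chars.split₀.go (c :: cs) [] [] = PySem.Chars.split₀.go cs [] [] := by
          simp [PySem.Chars.split₀.go, hs]
        rw [ih2 out p, hgo]
      · -- leading whitespace
        simp only [List.foldl_cons, pvStepB, hs, if_true, Option.isSome_none]
        have hgo : PySem.Chars.split₀.go (c :: cs) [] [] = PySem.Chars.split₀.go cs [] [] := by
          simp [PySem.Chars.split₀.go, hs]
        rw [ih3 out, hgo]
    · refine ⟨fun out p => ?_, fun out p => ?_, fun out => ?_⟩
      · -- mid-word, next word char
        have hgo : PySem.Chars.split₀.go (c :: cs) [p] [] =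
            PySem.Chars.split₀.go cs (c :: [p]) [] := by
          simp [PySem.Chars.split₀.go, hs]
        simp only [List.foldl_cons, pvStepB, hs, if_false, Bool.false_eq_true]
        rw [ih1 (out ++ [p]) c, hgo, pv_glue_cons cs c [p]]
        simp
      · -- gap then a word char: maybe emit a space
        have hgo : PySem.Chars.split₀.go (c :: cs) [] [] =
            PySem.Chars.split₀.go cs [c] [] := by
          simp [PySem.Chars.split₀.go, hs]
        obtain ⟨t, ws, hws⟩ := pv_go_cons cs c []
        simp only [List.reverse_cons, List.reverse_nil, List.nil_append, List.singleton_append] at hws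
        by_cases hok : pvOkC p && pvOkC c
        · simp only [List.foldl_cons, pvStepB, hs, if_false, Bool.false_eq_true, if_pos, hok]
          rw [ih1 (out ++ [' ']) c, hgo, hws]
          simp [pvGlue, pvGlueFrom, hok]
        · simp only [List.foldl_cons, pvStepB, hs, if_false, Bool.false_eq_true, if_pos, hok, if_false]
          rw [ih1 out c, hgo, hws]
          simp [pvGlue, pvGlueFrom, hok]
      · -- first word char
        have hgo : PySem.Chars.split₀.go (c :: cs) [] [] =
            PySem.Chars.split₀.go cs [c] [] := by
          simp [PySem.Chars.split₀.go, hs]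
        simp only [List.foldl_cons, pvStepB, hs, if_false, Bool.false_eq_true]
        rw [ih1 out c, hgo]

theorem pv_bodyA_succ (w : String) (rest : List String) (r : List String) (k : Nat) :
    pvBodyA (w :: rest) r ((k + 1 : Nat) : Int) = pvBodyA rest r (k : Int) := by
  unfold pvBodyA
  rw [show (((k + 1 : Nat) : Int) + 1) = ((k + 2 : Nat) : Int) by push_cast; ring,
      show (((k : Nat) : Int) + 1) = ((k + 1 : Nat) : Int) by push_cast; ring,
      PySem.List.pyGetD_natCast, PySem.List.pyGetD_natCast,
      PySem.List.pyGetD_natCast, PySem.List.pyGetD_natCast]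
  have hg1 : List.getD (w :: rest) (k + 1) "" = List.getD rest k "" := by simp [List.getD]
  have hg2 : List.getD (w :: rest) (k + 2) "" = List.getD rest (k + 1) "" := by simp [List.getD]
  have h4 : decide (((k + 2 : Nat) : Int) < ((w :: rest).length : Int)) =
      decide (((k + 1 : Nat) : Int) < (rest.length : Int)) := by
    by_cases h : k + 1 < rest.length
    · exact decide_eq_decide.mpr (by simp; omega)
    · exact decide_eq_decide.mpr (by simp; omega)
  rw [hg1, hg2, h4]

theorem pv_loopA (ws : List String) : ∀ (res : List String),
    (List.range ws.length).foldl (fun r (k : Nat) => pvBodyA ws r (k : Int)) res =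
      res ++ pvGlueS ws := by
  induction ws with
  | nil => intro res; simp [pvGlueS]
  | cons w rest ih =>
    intro res
    rw [List.length_cons, List.range_succ_eq_map]
    simp only [List.foldl_cons, List.foldl_map]
    have hbody : (fun (r : List String) (k : Nat) => pvBodyA (w :: rest) r ((k.succ : Nat) : Int)) =
        fun (r : List String) (k : Nat) => pvBodyA rest r (k : Int) := by
      funext r k
      exact pv_bodyA_succ w rest r k
    rw [show ((0 : Nat) : Int) = (0 : Int) from rfl, hbody, ih (pvBodyA (w :: rest) res 0)]
    cases rest with
    | nil => simp [pvBodyA, pvGlueS]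
    | cons w' rest' =>
      have hg : PySem.List.pyGetD (w :: w' :: rest') ((0 : Int) + 1) "" = w' := by
        rw [show ((0 : Int) + 1) = ((1 : Nat) : Int) by norm_num, PySem.List.pyGetD_natCast]
        rfl
      have hlt : decide ((0 : Int) + 1 < ((w :: w' :: rest').length : Int)) = true := by
        simp
      simp only [pvBodyA, PySem.List.pyGetD_zero_cons, hg, hlt]
      by_cases hc : pvCondLast w && pvCondHead w' <;> simp [pvGlueS, hc]

theorem pv_condLast_eq (w : String) (h : w.toList ≠ []) :
    pvCondLast w = pvOkC (w.toList.getLastD ' ') := by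
  have hlen : 1 ≤ w.toList.length := by
    cases hw : w.toList with
    | nil => exact absurd hw h
    | cons a l => simp
  have hget : PySem.List.pyGet? w.toList (-1) = some (w.toList.getLastD ' ') := by
    rw [PySem.List.pyGet?_neg_ofNat w.toList 1 (by omega) hlen, ← List.getLast?_eq_getElem?]
    obtain ⟨x, hx⟩ := Option.isSome_iff_exists.mp (List.getLast?_isSome.mpr h)
    rw [hx, List.getLastD_eq_getLast?, hx]
    rfl
  simp [pvCondLast, PySem.Str.pyGet?_eq, PySem.Chars.pyGet?_eq_listPyGet?, hget, pvOkC]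

theorem pv_condHead_eq (w : String) (h : w.toList ≠ []) :
    pvCondHead w = pvOkC (w.toList.headD ' ') := by
  have hget : PySem.List.pyGet? w.toList 0 = some (w.toList.headD ' ') := by
    rw [PySem.List.pyGet?_zero]
    cases hw : w.toList with
    | nil => exact absurd hw h
    | cons a l => simp
  simp [pvCondHead, PySem.Str.pyGet?_eq, PySem.Chars.pyGet?_eq_listPyGet?, hget, pvOkC]

theorem pv_join_nil_flatten (l : List (List Char)) : PySem.Chars.join [] l = l.flatten := by
  induction l with
  | nil => simp [PySem.Chars.join_nil]
  | cons a t ih =>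
    cases t with
    | nil => simp [PySem.Chars.join_singleton]
    | cons b t' =>
      rw [PySem.Chars.join_cons_cons]
      simp [ih]

theorem pv_join_glueS (ws : List String) (h : ∀ w ∈ ws, w.toList ≠ []) :
    (PySem.Str.join "" (pvGlueS ws)).toList = pvGlue (ws.map String.toList) := by
  induction ws with
  | nil => simp [pvGlueS, PySem.Str.toList_join, PySem.Chars.join_nil, pvGlue]
  | cons w rest ih =>
    cases rest with
    | nil =>
      simp [pvGlueS, PySem.Str.toList_join, pvGlue, pvGlueFrom]
    | cons w' rest' =>
      have hw : w.toList ≠ [] := h w (by simp)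
      have hw' : w'.toList ≠ [] := h w' (by simp)
      have ih' := ih (fun v hv => h v (List.mem_cons_of_mem _ hv))
      rw [PySem.Str.toList_join, show ("" : String).toList = ([] : List Char) from rfl,
          pv_join_nil_flatten] at ih' ⊢
      have hexp : pvGlueS (w :: w' :: rest') =
          [w] ++ (if pvCondLast w && pvCondHead w' then [" "] else []) ++ pvGlueS (w' :: rest') := by
        simp [pvGlueS]
      rw [hexp]
      simp only [List.map_append, List.flatten_append, List.map_cons, List.map_nil,
        List.flatten_cons, List.flatten_nil, List.append_nil]
      rw [ih']
      have hglue : pvGlue (w.toList :: w'.toList :: List.map String.toList rest') =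
          w.toList ++ ((if pvOkC (w.toList.getLastD ' ') && pvOkC (w'.toList.headD ' ')
              then [' '] else []) ++ pvGlue (w'.toList :: List.map String.toList rest')) := by
        simp [pvGlue, pvGlueFrom]
      rw [List.map_cons, hglue, pv_condLast_eq w hw, pv_condHead_eq w' hw']
      split_ifs <;> simp

theorem pv_final (line : String) :
    (let words := (PySem.Str.split₀ line).filter (fun w => !(w == ""))
     PySem.Str.join "" ((PySem.List.pyRange 0 (words.length : Int) 1).foldl (pvBodyA words) [])) =
      String.ofList (line.toList.foldl pvStepB ([], none, false)).1 := by
  have hne : ∀ w ∈ PySem.Str.split₀ line, w.toList ≠ [] := by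
    intro w hw
    rcases List.mem_map.mp hw with ⟨w', hw', rfl⟩
    have : w' ≠ [] := pv_go_ne line.toList [] [] (by simp) w' hw'
    simpa [String.toList_ofList] using this
  have hfilter : (PySem.Str.split₀ line).filter (fun w => !(w == "")) = PySem.Str.split₀ line := by
    rw [List.filter_eq_self]
    intro w hw
    have hwl := hne w hw
    have hwe : w ≠ "" := fun hEq => hwl (by simp [hEq])
    simpa using hwe
  simp only [hfilter]
  set ws := PySem.Str.split₀ line with hws
  -- A's loop over pyRange reduces to the Nat-range fold
  have hloop : (PySem.List.pyRange 0 (ws.length : Int) 1).foldl (pvBodyA ws) [] = pvGlueS ws := by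
    rw [PySem.List.pyRange_one, List.foldl_map]
    have : (fun (r : List String) (k : Nat) => pvBodyA ws r ((0 : Int) + ↑k)) =
        fun (r : List String) (k : Nat) => pvBodyA ws r (k : Int) := by
      funext r k; rw [zero_add]
    rw [show ((ws.length : Int) - 0).toNat = ws.length by omega, this, pv_loopA ws []]
    simp
  rw [hloop]
  -- B's scan
  have hscan : (line.toList.foldl pvStepB ([], none, false)).1 =
      pvGlue (PySem.Chars.split₀ line.toList) := by
    have := (pv_scan line.toList).2.2 []
    simpa [PySem.Chars.split₀] using this
  rw [hscan]
  -- both sides are the glued word list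
  have hA : (PySem.Str.join "" (pvGlueS ws)).toList = pvGlue (PySem.Chars.split₀ line.toList) := by
    rw [pv_join_glueS ws (fun w hw => hne w hw), hws, PySem.Str.split₀_map_toList]
  rw [← hA, String.ofList_toList]

-- ===== VERDICT (by name: the statement is the Claim_ definition above) =====
theorem delete_meaningless_spaces_one_line_py_spec : Claim_equal_delete_meaningless_spaces_one_line_py := by
  intro line _
  unfold Spec_delete_meaningless_spaces_one_line_py
  simp only [delete_meaningless_spaces_one_line_py, delete_meaningless_spaces_one_line_py_alt]
  exact pv_final line
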